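-- pv_equiv track=rewrite | github.com/wcchristian/advent-of-code | 2025/day11/day11.py | count_paths2
-- ===== SOURCE A (Python) =====
-- def count_paths2(device_dict, current_device, req_devices=None):
--
--     if req_devices and current_device in req_devices.keys():
--         req_devices[current_device] = True
--
--     if current_device == 'out':
--         return 1 if all(list(req_devices.values())) else 0
--
--     total_paths = 0
--     outputs = device_dict[current_device]
--     for output in outputs:
--         total_paths += count_paths2(device_dict, output, req_devices)
--
--     return total_paths
-- ===== SOURCE B (Python) =====
-- def count_paths2(device_dict, current_device, req_devices=None):
--     # Iterative pre-order DFS with an explicit stack instead of recursion.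
--     # Mutates req_devices in place exactly like the recursive original.
--     total_paths = 0
--     stack = [current_device]
--     while stack:
--         node = stack.pop()
--         if req_devices and node in req_devices.keys():
--             req_devices[node] = True
--         if node == 'out':
--             total_paths += 1 if all(list(req_devices.values())) else 0
--         else:
--             stack.extend(reversed(device_dict[node]))
--     return total_paths
-- ===== Notes on version B (the rewrite author's own statement) =====
-- stated objective: alternative
-- what changed: The recursive DFS is rewritten as an iterative loop over an explicit stack (children pushed in reversed order so the pre-order and the shared flag-dict mutations are identical) with a running counter instead of summed recursive returns; Pre_ excludes exactly the inputs on which A raises: a reachable node that is neither 'out' nor a key of device_dict (KeyError), a cycle reachable from current_device (RecursionError), and req_devices=None when 'out' is reachable (AttributeError).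
import Mathlib
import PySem

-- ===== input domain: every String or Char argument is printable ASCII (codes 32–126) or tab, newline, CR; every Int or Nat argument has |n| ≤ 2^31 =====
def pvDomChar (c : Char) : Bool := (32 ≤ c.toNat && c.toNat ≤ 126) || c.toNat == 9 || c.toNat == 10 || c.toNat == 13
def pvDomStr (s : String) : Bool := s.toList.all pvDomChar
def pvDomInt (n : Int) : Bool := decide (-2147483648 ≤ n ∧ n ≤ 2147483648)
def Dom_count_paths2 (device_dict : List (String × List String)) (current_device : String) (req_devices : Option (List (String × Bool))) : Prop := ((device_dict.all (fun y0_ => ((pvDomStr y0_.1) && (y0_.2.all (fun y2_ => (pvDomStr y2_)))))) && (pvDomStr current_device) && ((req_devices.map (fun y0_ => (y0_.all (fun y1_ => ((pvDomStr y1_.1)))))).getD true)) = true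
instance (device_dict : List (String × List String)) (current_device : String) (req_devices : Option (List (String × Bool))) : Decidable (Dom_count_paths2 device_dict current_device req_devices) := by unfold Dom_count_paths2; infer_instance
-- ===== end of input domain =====

-- B rewrites the recursive DFS of A as an iterative explicit-stack loop with a running counter;
-- both mutate req_devices in place in Python, so the theorems below are about the RETURN value
-- (the ports thread the dict state explicitly and it provably agrees as well along the way).

-- ===== PORT A =====
-- `if req_devices and current_device in req_devices.keys(): req_devices[current_device] = True`
-- (identical line in both Pythons, hence one helper shared by both ports)
def pvFlagUpd (cd : String) (rd : Option (List (String × Bool))) : Option (List (String × Bool)) :=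
  match rd with
  | none => none
  | some d =>
      if d ≠ [] ∧ (PySem.Dict.mk d).contains cd = true
      then some ((PySem.Dict.mk d).insert cd true).items
      else some d

-- `1 if all(list(req_devices.values())) else 0`; at req_devices = None Python raises
-- AttributeError — excluded by Pre_count_paths2, the port returns 0 there.
def pvOutVal (rd : Option (List (String × Bool))) : Int :=
  match rd with
  | none => 0
  | some d => if (PySem.Dict.mk d).values.all (fun v => v) then 1 else 0

-- A's recursion, dict state threaded explicitly; fuel only makes it total (Python's
-- RecursionError / KeyError inputs lie outside Pre_count_paths2, where the fuel never runs out).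
def countA (device_dict : List (String × List String)) :
    Nat → String → Option (List (String × Bool)) → Int × Option (List (String × Bool))
  | 0, _, rd => (0, rd)
  | fuel+1, cd, rd =>
      let rd1 := pvFlagUpd cd rd
      if cd = "out" then (pvOutVal rd1, rd1)
      else
        -- `outputs = device_dict[current_device]`; missing key = KeyError, outside Pre_
        let outs := ((PySem.Dict.mk device_dict).get? cd).getD []
        outs.foldl (fun s t =>
          let r := countA device_dict fuel t s.2
          (s.1 + r.1, r.2)) ((0 : Int), rd1)

def count_paths2 (device_dict : List (String × List String)) (current_device : String) (req_devices : Option (List (String × Bool))) : Int :=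
  (countA device_dict (device_dict.length + 1) current_device req_devices).1

-- ===== PORT B =====
-- fuel bound for B's while-loop: exact number of pops needed below current_device (a totality
-- guard only; under Pre_count_paths2 it is provably sufficient)
def tcost (device_dict : List (String × List String)) : Nat → String → Nat
  | 0, _ => 1
  | fuel+1, cd =>
      if cd = "out" then 1
      else 1 + (((PySem.Dict.mk device_dict).get? cd).getD []).foldl
                  (fun a t => a + tcost device_dict fuel t) 0

-- B's while-loop; the Lean list's HEAD is the Python stack's top (its end), so Python's
-- `stack.extend(reversed(outputs)); … stack.pop()` is `outs ++ stack` here.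
def countB (device_dict : List (String × List String)) :
    Nat → List String → Int → Option (List (String × Bool)) → Int × Option (List (String × Bool))
  | _, [], c, rd => (c, rd)
  | 0, _ :: _, c, rd => (c, rd)
  | fuel+1, node :: stack, c, rd =>
      let rd1 := pvFlagUpd node rd
      if node = "out" then countB device_dict fuel stack (c + pvOutVal rd1) rd1
      else countB device_dict fuel
            ((((PySem.Dict.mk device_dict).get? node).getD []) ++ stack) c rd1

def count_paths2_alt (device_dict : List (String × List String)) (current_device : String) (req_devices : Option (List (String × Bool))) : Int :=
  (countB device_dict (tcost device_dict (device_dict.length + 1) current_device)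
    [current_device] 0 req_devices).1

-- ===== PRECONDITION & SPEC =====
-- graph vocabulary used only by Pre_ and the proofs (never by the ports):
-- successors of a node as A follows them ('out' is a sink: A returns there without looking it up)
def childrenOf (dd : List (String × List String)) (t : String) : List String :=
  if t = "out" then [] else ((PySem.Dict.mk dd).get? t).getD []

def keysF (dd : List (String × List String)) : Finset String := (dd.map Prod.fst).toFinset

def stepF (dd : List (String × List String)) (S : Finset String) : Finset String :=
  S ∪ S.biUnion (fun t => (childrenOf dd t).toFinset)

def iterF (dd : List (String × List String)) : Nat → Finset String → Finset String
  | 0, S => S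
  | n+1, S => iterF dd n (stepF dd S)

-- enough iterations to saturate: one more than the number of nodes that can ever appear
def fuelN (dd : List (String × List String)) : Nat :=
  1 + dd.length + (dd.map (fun p => p.2.length)).sum

-- everything A visits starting from t
def reachS (dd : List (String × List String)) (t : String) : Finset String :=
  iterF dd (fuelN dd) {t}

-- Pre_ excludes exactly the inputs on which the Python A raises: a node reachable from
-- current_device that is neither 'out' nor a key of device_dict (KeyError), a reachable cycle
-- (RecursionError), and req_devices = None when 'out' is reachable (AttributeError).
-- (The second conjunct — each reachable set is closed under successors — always holds, since
-- fuelN iterations saturate; it is stated so that Pre_ stays a decidable closed form.)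
def Pre_count_paths2 (device_dict : List (String × List String)) (current_device : String) (req_devices : Option (List (String × Bool))) : Prop :=
  (∀ t ∈ reachS device_dict current_device, t = "out" ∨ t ∈ keysF device_dict) ∧
  (∀ t ∈ reachS device_dict current_device, ∀ v ∈ reachS device_dict t,
      ∀ u ∈ childrenOf device_dict v, u ∈ reachS device_dict t) ∧
  (∀ t ∈ reachS device_dict current_device, t ≠ "out" →
      ∀ u ∈ childrenOf device_dict t, t ∉ reachS device_dict u) ∧
  (req_devices ≠ none ∨ "out" ∉ reachS device_dict current_device)
instance (device_dict : List (String × List String)) (current_device : String) (req_devices : Option (List (String × Bool))) : Decidable (Pre_count_paths2 device_dict current_device req_devices) := by unfold Pre_count_paths2; infer_instance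

def pvWitness_count_paths2 : (List (String × List String)) × String × (Option (List (String × Bool))) :=
  ([("in", ["a", "a"]), ("a", ["out"])], "in", some [("a", false)])

def Spec_count_paths2 (device_dict : List (String × List String)) (current_device : String) (req_devices : Option (List (String × Bool))) (out : Int) : Prop := out = count_paths2_alt device_dict current_device req_devices
instance (device_dict : List (String × List String)) (current_device : String) (req_devices : Option (List (String × Bool))) (out : Int) : Decidable (Spec_count_paths2 device_dict current_device req_devices out) := by unfold Spec_count_paths2; infer_instance

-- ===== CLAIM (what is proved, stated in full; the proofs are below) =====
def Claim_equal_count_paths2 : Prop := ∀ (device_dict : List (String × List String)) (current_device : String) (req_devices : Option (List (String × Bool))), Dom_count_paths2 device_dict current_device req_devices → Pre_count_paths2 device_dict current_device req_devices → Spec_count_paths2 device_dict current_device req_devices (count_paths2 device_dict current_device req_devices)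

-- ===== LEMMAS AND PROOFS =====

-- termination measure: number of distinct device keys A can still visit below t
def mns (dd : List (String × List String)) (t : String) : Nat :=
  if t = "out" then 0 else ((reachS dd t) ∩ keysF dd).card

theorem subset_iterF (dd : List (String × List String)) :
    ∀ (n : Nat) (S : Finset String), S ⊆ iterF dd n S := by
  intro n
  induction n with
  | zero => intro S; simp [iterF]
  | succ n ih =>
      intro S
      exact Finset.Subset.trans Finset.subset_union_left (ih (stepF dd S))

theorem mem_reachS_self (dd : List (String × List String)) (t : String) :
    t ∈ reachS dd t :=
  subset_iterF dd (fuelN dd) {t} (Finset.mem_singleton_self t)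

theorem iterF_subset (dd : List (String × List String)) (T : Finset String)
    (hT : ∀ v ∈ T, ∀ u ∈ childrenOf dd v, u ∈ T) :
    ∀ (n : Nat) (S : Finset String), S ⊆ T → iterF dd n S ⊆ T := by
  intro n
  induction n with
  | zero => intro S hS; simpa [iterF] using hS
  | succ n ih =>
      intro S hS
      refine ih (stepF dd S) ?_
      refine Finset.union_subset hS ?_
      intro u hu
      obtain ⟨t, ht, hut⟩ := Finset.mem_biUnion.mp hu
      exact hT t (hS ht) u (List.mem_toFinset.mp hut)

-- first-match dict lookup succeeds on a listed key
theorem get?_mk_of_mem :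
    ∀ (dd : List (String × List String)) (cd : String), cd ∈ dd.map Prod.fst →
      ∃ v, (PySem.Dict.mk dd).get? cd = some v := by
  intro dd
  induction dd with
  | nil => intro cd h; simp at h
  | cons p rest ih =>
      obtain ⟨k, v⟩ := p
      intro cd hmem
      by_cases hp : k = cd
      · subst hp
        exact ⟨v, by rw [PySem.Dict.get?_mk_cons]; simp⟩
      · have hm : cd ∈ rest.map Prod.fst := by
          rw [List.map_cons] at hmem
          rcases List.mem_cons.mp hmem with h | h
          · exact absurd h.symm hp
          · exact h
        obtain ⟨w, hw⟩ := ih cd hm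
        exact ⟨w, by rw [PySem.Dict.get?_mk_cons]; simpa [hp] using hw⟩

-- cost of a list of nodes (B-side fuel bookkeeping)
def lcost (dd : List (String × List String)) (d : Nat) : List String → Nat
  | [] => 0
  | t :: ts => tcost dd d t + lcost dd d ts

theorem lcost_eq_foldl (dd : List (String × List String)) (d : Nat) :
    ∀ (l : List String) (a : Nat),
      l.foldl (fun a t => a + tcost dd d t) a = a + lcost dd d l := by
  intro l
  induction l with
  | nil => intro a; simp [lcost]
  | cons t ts ih => intro a; simp [List.foldl, lcost, ih]; omega

-- A's child fold, as a named function
def foldA (dd : List (String × List String)) (d : Nat) (outs : List String)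
    (s : Int × Option (List (String × Bool))) : Int × Option (List (String × Bool)) :=
  outs.foldl (fun s t =>
    let r := countA dd d t s.2
    (s.1 + r.1, r.2)) s

theorem foldA_shift (dd : List (String × List String)) (d : Nat) :
    ∀ (outs : List String) (c : Int) (rd : Option (List (String × Bool))),
      foldA dd d outs (c, rd)
        = (c + (foldA dd d outs (0, rd)).1, (foldA dd d outs (0, rd)).2) := by
  intro outs
  induction outs with
  | nil => intro c rd; simp [foldA]
  | cons t ts ih =>
      intro c rd
      simp only [foldA, List.foldl] at ih ⊢
      rw [ih, ih (0 + (countA dd d t rd).1)]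
      simp [add_assoc]

-- main simulation lemma: running B's stack loop over `outs` consumes exactly `lcost` fuel and
-- advances the (counter, dict) state exactly as A's threaded child fold does
theorem countB_sim (dd : List (String × List String)) (R : Finset String)
    (ha : ∀ t ∈ R, t = "out" ∨ t ∈ keysF dd)
    (hb : ∀ t ∈ R, ∀ u ∈ childrenOf dd t, u ∈ R)
    (hm1 : ∀ t ∈ R, t ≠ "out" → 1 ≤ mns dd t)
    (hmd : ∀ t ∈ R, t ≠ "out" → ∀ u ∈ childrenOf dd t, u ≠ "out" → mns dd u < mns dd t) :
    ∀ (d : Nat) (outs : List String), (∀ t ∈ outs, t ∈ R ∧ mns dd t < d) →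
      ∀ (stack : List String) (c : Int) (rd : Option (List (String × Bool))) (fb : Nat),
        countB dd (lcost dd d outs + fb) (outs ++ stack) c rd
          = countB dd fb stack (foldA dd d outs (c, rd)).1 (foldA dd d outs (c, rd)).2 := by
  intro d
  induction d with
  | zero =>
      intro outs hok stack c rd fb
      cases outs with
      | nil => simp [lcost, foldA]
      | cons t ts => exact absurd (hok t (by simp)).2 (by omega)
  | succ e ihd =>
      intro outs
      induction outs with
      | nil => intro _ stack c rd fb; simp [lcost, foldA]
      | cons t ts ihts =>
          intro hok stack c rd fb
          have hokt := hok t (by simp)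
          have hokts : ∀ x ∈ ts, x ∈ R ∧ mns dd x < e + 1 := fun x hx => hok x (by simp [hx])
          by_cases ht : t = "out"
          · subst ht
            have hfuel : lcost dd (e + 1) ("out" :: ts) + fb
                = (lcost dd (e + 1) ts + fb) + 1 := by
              simp [lcost, tcost]; omega
            rw [hfuel]
            show countB dd ((lcost dd (e+1) ts + fb) + 1) ("out" :: (ts ++ stack)) c rd = _
            simp only [countB]
            rw [ihts hokts]
            have hA : countA dd (e + 1) "out" rd
                = (pvOutVal (pvFlagUpd "out" rd), pvFlagUpd "out" rd) := by
              simp [countA]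
            simp only [foldA, List.foldl, hA, if_true]
          · have hmem : t ∈ dd.map Prod.fst :=
              List.mem_toFinset.mp ((ha t hokt.1).resolve_left ht)
            obtain ⟨outs', hdget⟩ := get?_mk_of_mem dd t hmem
            have hch : childrenOf dd t = outs' := by simp [childrenOf, ht, hdget]
            have hm1t : 1 ≤ mns dd t := hm1 t hokt.1 ht
            have hchild : ∀ x ∈ outs', x ∈ R ∧ mns dd x < e := by
              intro x hx
              have hxc : x ∈ childrenOf dd t := by rw [hch]; exact hx
              refine ⟨hb t hokt.1 x hxc, ?_⟩
              by_cases hxo : x = "out"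
              · subst hxo
                have : mns dd "out" = 0 := by simp [mns]
                omega
              · have := hmd t hokt.1 ht x hxc hxo
                have := hokt.2
                omega
            have htc : tcost dd (e + 1) t = 1 + lcost dd e outs' := by
              rw [tcost, if_neg ht, hdget]
              simp [lcost_eq_foldl]
            have hfuel : lcost dd (e + 1) (t :: ts) + fb
                = (lcost dd e outs' + (lcost dd (e + 1) ts + fb)) + 1 := by
              simp [lcost, htc]; omega
            rw [hfuel]
            show countB dd ((lcost dd e outs' + (lcost dd (e+1) ts + fb)) + 1)
              (t :: (ts ++ stack)) c rd = _
            simp only [countB, if_neg ht]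
            rw [hdget]
            simp only [Option.getD_some]
            rw [ihd outs' hchild (ts ++ stack) c (pvFlagUpd t rd) (lcost dd (e+1) ts + fb)]
            rw [ihts hokts]
            have hA : countA dd (e + 1) t rd = foldA dd e outs' (0, pvFlagUpd t rd) := by
              simp only [countA, foldA]
              rw [if_neg ht, hdget]
              rfl
            have hstep : foldA dd e outs' (c, pvFlagUpd t rd)
                = (c + (countA dd (e + 1) t rd).1, (countA dd (e + 1) t rd).2) := by
              rw [foldA_shift, hA]
            rw [hstep]
            simp only [foldA, List.foldl]

-- ===== VERDICT (by name: the statement is the Claim_ definition above) =====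
theorem count_paths2_spec : Claim_equal_count_paths2 := by
  intro dd cd rd _ hpre
  show count_paths2 dd cd rd = count_paths2_alt dd cd rd
  unfold Pre_count_paths2 at hpre
  obtain ⟨ha, hc2, hc3, _⟩ := hpre
  have hcdR : cd ∈ reachS dd cd := mem_reachS_self dd cd
  have hb : ∀ t ∈ reachS dd cd, ∀ u ∈ childrenOf dd t, u ∈ reachS dd cd :=
    fun t ht u hu => hc2 cd hcdR t ht u hu
  have hm1 : ∀ t ∈ reachS dd cd, t ≠ "out" → 1 ≤ mns dd t := by
    intro t ht hto
    have htk : t ∈ keysF dd := (ha t ht).resolve_left hto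
    have : t ∈ (reachS dd t) ∩ keysF dd :=
      Finset.mem_inter.mpr ⟨mem_reachS_self dd t, htk⟩
    rw [mns, if_neg hto]
    exact Finset.card_pos.mpr ⟨t, this⟩
  have hmd : ∀ t ∈ reachS dd cd, t ≠ "out" →
      ∀ u ∈ childrenOf dd t, u ≠ "out" → mns dd u < mns dd t := by
    intro t ht hto u hu huo
    have htk : t ∈ keysF dd := (ha t ht).resolve_left hto
    have huRt : u ∈ reachS dd t := hc2 t ht t (mem_reachS_self dd t) u hu
    have hRuRt : reachS dd u ⊆ reachS dd t :=
      iterF_subset dd (reachS dd t) (fun v hv w hw => hc2 t ht v hv w hw)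
        (fuelN dd) {u} (Finset.singleton_subset_iff.mpr huRt)
    have htnotRu : t ∉ reachS dd u := hc3 t ht hto u hu
    have hss : (reachS dd u) ∩ keysF dd ⊂ (reachS dd t) ∩ keysF dd := by
      refine (Finset.ssubset_iff_of_subset
        (Finset.inter_subset_inter_right hRuRt)).mpr ?_
      exact ⟨t, Finset.mem_inter.mpr ⟨mem_reachS_self dd t, htk⟩,
        fun hmem => htnotRu (Finset.mem_inter.mp hmem).1⟩
    rw [mns, if_neg huo, mns, if_neg hto]
    exact Finset.card_lt_card hss
  have hmcd : mns dd cd < dd.length + 1 := by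
    by_cases hco : cd = "out"
    · simp [mns, hco]
    · rw [mns, if_neg hco]
      have h1 : ((reachS dd cd) ∩ keysF dd).card ≤ (keysF dd).card :=
        Finset.card_le_card Finset.inter_subset_right
      have h2 : (keysF dd).card ≤ dd.length := by
        calc (keysF dd).card ≤ (dd.map Prod.fst).length := List.toFinset_card_le _
        _ = dd.length := by rw [List.length_map]
      omega
  have hsim := countB_sim dd (reachS dd cd) ha hb hm1 hmd (dd.length + 1) [cd]
    (by intro t htm; rw [List.mem_singleton] at htm; subst htm; exact ⟨hcdR, hmcd⟩)
    [] 0 rd 0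
  have hfuel : lcost dd (dd.length + 1) [cd] + 0 = tcost dd (dd.length + 1) cd := by
    simp [lcost]
  rw [hfuel] at hsim
  rw [count_paths2, count_paths2_alt]
  simp only [List.append_nil] at hsim
  rw [hsim]
  simp [countB, foldA]
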